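-- pv_equiv track=rewrite | github.com/tensorzero/tensorzero | ci/check_use_placement.py | count_braces
-- ===== SOURCE A (Python) =====
-- def count_braces(line: str) -> int:
--     """Count net brace change in a line, skipping strings and comments."""
--     # Strip line comments
--     comment_pos = line.find("//")
--     if comment_pos >= 0:
--         line = line[:comment_pos]
--     depth = 0
--     in_string = False
--     escape = False
--     for ch in line:
--         if escape:
--             escape = False
--             continue
--         if ch == "\\":
--             escape = True
--             continue
--         if in_string:
--             if ch == '"':
--                 in_string = False
--         else:
--             if ch == '"':
--                 in_string = True
--             elif ch == "{":
--                 depth += 1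
--             elif ch == "}":
--                 depth -= 1
--     return depth
-- ===== SOURCE B (Python) =====
-- def count_braces(line: str) -> int:
--     """Count net brace change in a line, skipping strings and comments."""
--     comment_pos = line.find("//")
--     if comment_pos >= 0:
--         line = line[:comment_pos]
--     # Remove-then-count pipeline: drop every backslash-escape pair, then split on
--     # quotes; the even-indexed segments are the text outside string literals.
--     chars = []
--     i = 0
--     n = len(line)
--     while i < n:
--         if line[i] == "\\":
--             i += 2
--         else:
--             chars.append(line[i])
--             i += 1
--     total = 0
--     for idx, seg in enumerate("".join(chars).split('"')):
--         if idx % 2 == 0: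
--             total += seg.count("{") - seg.count("}")
--     return total
-- ===== Notes on version B (the rewrite author's own statement) =====
-- stated objective: simpler
-- what changed: Replaces A's single char-by-char scan with three boolean state flags by a remove-then-count pipeline: drop every backslash-escape pair, split the rest at quote characters, and sum the brace counts of the even-indexed (outside-string) segments.
import Mathlib
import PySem

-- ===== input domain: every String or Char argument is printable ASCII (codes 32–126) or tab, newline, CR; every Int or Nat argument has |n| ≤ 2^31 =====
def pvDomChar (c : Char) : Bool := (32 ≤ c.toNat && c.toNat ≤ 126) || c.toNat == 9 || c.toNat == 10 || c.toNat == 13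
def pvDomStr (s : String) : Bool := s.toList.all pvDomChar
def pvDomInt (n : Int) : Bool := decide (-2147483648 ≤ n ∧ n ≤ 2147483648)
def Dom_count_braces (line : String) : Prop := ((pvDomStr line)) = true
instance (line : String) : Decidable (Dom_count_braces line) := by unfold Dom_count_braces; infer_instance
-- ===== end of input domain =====

-- B replaces A's three-flag character state machine by a remove-then-count pipeline
-- (drop escape pairs, split on quotes, count braces in the even segments): simpler, same cost.

-- ===== PORT A =====
-- one iteration of A's for-loop; state = (depth, in_string, escape)
def countBracesStep (st : Int × Bool × Bool) (ch : Char) : Int × Bool × Bool :=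
  match st with
  | (depth, instr, esc) =>
    if esc then (depth, instr, false)
    else if ch = '\\' then (depth, instr, true)
    else if instr then
      if ch = '"' then (depth, false, esc) else (depth, instr, esc)
    else
      if ch = '"' then (depth, true, esc)
      else if ch = '{' then (depth + 1, instr, esc)
      else if ch = '}' then (depth - 1, instr, esc)
      else (depth, instr, esc)

def count_braces (line : String) : Int :=
  let cs := line.toList
  let commentPos := PySem.Chars.find cs ['/', '/']
  let cs := if commentPos ≥ 0 then PySem.List.slice cs none (some commentPos) else cs
  (cs.foldl countBracesStep (0, false, false)).1

-- ===== PORT B =====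
-- Source B's index loop: a backslash consumes itself and the next character (i += 2)
def stripEscapes : List Char → List Char
  | [] => []
  | [c] => if c = '\\' then [] else [c]
  | c :: c2 :: rest =>
    if c = '\\' then stripEscapes rest
    else c :: stripEscapes (c2 :: rest)

def count_braces_alt (line : String) : Int :=
  let cs := line.toList
  let commentPos := PySem.Chars.find cs ['/', '/']
  let cs := if commentPos ≥ 0 then PySem.List.slice cs none (some commentPos) else cs
  let cleaned := stripEscapes cs
  let segs := PySem.Chars.splitOn cleaned ['"']
  (PySem.List.enumerate segs 0).foldl
    (fun total p =>
      if PySem.Int.mod p.1 2 == 0 then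
        total + (PySem.Chars.count p.2 ['{'] : Int) - (PySem.Chars.count p.2 ['}'] : Int)
      else total) 0

-- ===== PRECONDITION & SPEC =====
def Spec_count_braces (line : String) (out : Int) : Prop := out = count_braces_alt line
instance (line : String) (out : Int) : Decidable (Spec_count_braces line out) := by unfold Spec_count_braces; infer_instance

-- ===== CLAIM (what is proved, stated in full; the proofs are below) =====
def Claim_equal_count_braces : Prop := ∀ (line : String), Dom_count_braces line → Spec_count_braces line (count_braces line)

-- ===== LEMMAS AND PROOFS =====

-- proof-side model of Python's s.split('"')
def quoteSplit : List Char → List (List Char)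
  | [] => [[]]
  | c :: rest =>
    if c = '"' then [] :: quoteSplit rest
    else
      match quoteSplit rest with
      | [] => [[c]]
      | h :: t => (c :: h) :: t

-- net brace contribution of one segment
def netSeg (seg : List Char) : Int := (seg.count '{' : Int) - (seg.count '}' : Int)

-- sum of netSeg over alternating segments, counting those where the flag is true
def sumAlt (e : Bool) : List (List Char) → Int
  | [] => 0
  | h :: t => (if e then netSeg h else 0) + sumAlt (!e) t

-- proof-side two-state machine (after escapes are gone)
def scanB : List Char → Int → Bool → Int
  | [], d, _ => d
  | c :: rest, d, instr =>
    if c = '"' then scanB rest d (!instr)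
    else if instr then scanB rest d instr
    else scanB rest (d + (if c = '{' then 1 else if c = '}' then -1 else 0)) instr

theorem quoteSplit_ne_nil (l : List Char) : quoteSplit l ≠ [] := by
  cases l with
  | nil => simp [quoteSplit]
  | cons c rest =>
    simp only [quoteSplit]
    split_ifs
    · simp
    · cases h : quoteSplit rest <;> simp

theorem count_go_single (c : Char) (l : List Char) (fuel acc : Nat)
    (h : l.length ≤ fuel) :
    PySem.Chars.count.go [c] fuel l acc = acc + l.count c := by
  induction l generalizing fuel acc with
  | nil => cases fuel <;> simp [PySem.Chars.count.go]
  | cons x t ih =>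
    cases fuel with
    | zero => simp at h
    | succ f =>
      have hp : [c].isPrefixOf (x :: t) = (c == x) := by simp [List.isPrefixOf]
      have hd : List.drop ([c].length) (x :: t) = t := by simp
      simp only [PySem.Chars.count.go, hp, hd]
      by_cases hx : c = x
      · rw [if_pos (by simp [hx]), ih f (acc + 1) (by simpa using Nat.le_of_succ_le_succ h)]
        simp [hx.symm]
        omega
      · rw [if_neg (by simp [hx]), ih f acc (by simpa using Nat.le_of_succ_le_succ h)]
        have hxc : ¬ x = c := fun hh => hx hh.symm
        simp [hxc]

theorem count_single (l : List Char) (c : Char) :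
    PySem.Chars.count l [c] = l.count c := by
  have := count_go_single c l l.length 0 le_rfl
  simpa [PySem.Chars.count] using this

theorem split_go_quote (l : List Char) (fuel : Nat) (cur : List Char)
    (acc : List (List Char)) (h : l.length + 1 ≤ fuel) :
    PySem.Chars.splitOn.go ['"'] fuel l cur acc
      = acc.reverse ++ (quoteSplit l).modifyHead (cur.reverse ++ ·) := by
  induction l generalizing fuel cur acc with
  | nil =>
    cases fuel with
    | zero => omega
    | succ f => simp [PySem.Chars.splitOn.go, quoteSplit]
  | cons x t ih =>
    cases fuel with
    | zero => omega
    | succ f =>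
      have hd : List.drop (['"'].length) (x :: t) = t := by simp
      simp only [PySem.Chars.splitOn.go, hd]
      by_cases hx : x = '"'
      · rw [if_pos (by simp [List.isPrefixOf, hx])]
        rw [ih f [] (cur.reverse :: acc) (by simpa using Nat.le_of_succ_le_succ h)]
        simp only [quoteSplit, if_pos hx]
        cases hq : quoteSplit t <;> simp [List.modifyHead]
      · have hnp : ¬ (['"'].isPrefixOf (x :: t) = true) := by
          simp only [List.isPrefixOf, Bool.and_eq_true, beq_iff_eq]
          exact fun hh => hx hh.1.symm
        rw [if_neg hnp]
        rw [ih f (x :: cur) acc (by simpa using Nat.le_of_succ_le_succ h)]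
        simp only [quoteSplit, if_neg hx]
        cases hq : quoteSplit t with
        | nil => exact absurd hq (quoteSplit_ne_nil t)
        | cons hh tt => simp [List.modifyHead]

theorem splitOn_quote (l : List Char) :
    PySem.Chars.splitOn l ['"'] = quoteSplit l := by
  simp only [PySem.Chars.splitOn]
  rw [split_go_quote l (l.length + 1) [] [] le_rfl]
  cases hq : quoteSplit l with
  | nil => exact absurd hq (quoteSplit_ne_nil l)
  | cons h t => simp [List.modifyHead]

theorem netSeg_cons (c : Char) (h : List Char) :
    netSeg (c :: h) = (if c = '{' then 1 else if c = '}' then -1 else 0) + netSeg h := by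
  simp only [netSeg, List.count_cons]
  by_cases h1 : c = '{' <;> by_cases h2 : c = '}' <;> simp_all <;> ring

theorem scanB_eq_sumAlt (l : List Char) (d : Int) (instr : Bool) :
    scanB l d instr = d + sumAlt (!instr) (quoteSplit l) := by
  induction l generalizing d instr with
  | nil => simp [scanB, quoteSplit, sumAlt, netSeg]
  | cons c rest ih =>
    simp only [scanB, quoteSplit]
    by_cases hc : c = '"'
    · simp only [if_pos hc, ih]
      cases instr <;> simp [sumAlt, netSeg]
    · simp only [if_neg hc]
      cases hq : quoteSplit rest with
      | nil => exact absurd hq (quoteSplit_ne_nil rest)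
      | cons h t =>
        cases instr with
        | true => simp [ih, hq, sumAlt]
        | false =>
          simp [ih, hq, sumAlt, netSeg_cons]
          ring

theorem foldA_eq_scanB (l : List Char) (d : Int) (instr : Bool) :
    (l.foldl countBracesStep (d, instr, false)).1 = scanB (stripEscapes l) d instr := by
  induction l using stripEscapes.induct generalizing d instr with
  | case1 => simp [stripEscapes, scanB]
  | case2 => simp [stripEscapes, countBracesStep, scanB]
  | case3 c hc =>
    simp only [stripEscapes, if_neg hc, List.foldl_cons, List.foldl_nil, countBracesStep]
    cases instr <;> simp [scanB, hc] <;> split_ifs <;> simp_all [scanB] <;> (try omega)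
  | case4 c2 rest ih =>
    simp only [stripEscapes, List.foldl_cons, countBracesStep, if_pos rfl]
    simpa [countBracesStep] using ih d instr
  | case5 c c2 rest hc ih =>
    have hse : stripEscapes (c :: c2 :: rest) = c :: stripEscapes (c2 :: rest) := by
      simp [stripEscapes, hc]
    rw [List.foldl_cons, hse]
    cases instr with
    | true =>
      by_cases h1 : c = '"'
      · have hs : countBracesStep (d, true, false) c = (d, false, false) := by
          simp [countBracesStep, hc, h1]
        rw [hs, ih]; simp [scanB, h1]
      · have hs : countBracesStep (d, true, false) c = (d, true, false) := by
          simp [countBracesStep, hc, h1]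
        rw [hs, ih]; simp [scanB, h1]
    | false =>
      by_cases h1 : c = '"'
      · have hs : countBracesStep (d, false, false) c = (d, true, false) := by
          simp [countBracesStep, hc, h1]
        rw [hs, ih]; simp [scanB, h1]
      · by_cases h2 : c = '{'
        · have hs : countBracesStep (d, false, false) c = (d + 1, false, false) := by
            simp [countBracesStep, hc, h1, h2]
          rw [hs, ih]; simp [scanB, h1, h2]
        · by_cases h3 : c = '}'
          · have hs : countBracesStep (d, false, false) c = (d - 1, false, false) := by
              simp [countBracesStep, hc, h1, h2, h3]
            rw [hs, ih, show (d - 1 : Int) = d + -1 from by ring]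
            simp [scanB, h1, h2, h3]
          · have hs : countBracesStep (d, false, false) c = (d, false, false) := by
              simp [countBracesStep, hc, h1, h2, h3]
            rw [hs, ih]; simp [scanB, h1, h2, h3]

theorem foldEnum_eq_sumAlt (segs : List (List Char)) (s : Int) (acc : Int) :
    (PySem.List.enumerate segs s).foldl
      (fun total p =>
        if PySem.Int.mod p.1 2 == 0 then
          total + (PySem.Chars.count p.2 ['{'] : Int) - (PySem.Chars.count p.2 ['}'] : Int)
        else total) acc
      = acc + sumAlt (PySem.Int.mod s 2 == 0) segs := by
  induction segs generalizing s acc with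
  | nil => simp [PySem.List.enumerate_nil, sumAlt]
  | cons h t ih =>
    rw [PySem.List.enumerate_cons, List.foldl_cons, ih]
    have hmod : ∀ a : Int, PySem.Int.mod a 2 = a % 2 :=
      fun a => PySem.Int.mod_eq_emod_of_pos (by norm_num)
    have hflip : (PySem.Int.mod (s + 1) 2 == 0) = !(PySem.Int.mod s 2 == 0) := by
      rw [hmod, hmod]
      rcases Int.emod_two_eq s with hs | hs <;>
        simp [hs, Int.add_mul_emod_self_left] <;> omega
    rw [hflip]
    cases he : (PySem.Int.mod s 2 == 0) with
    | false =>
      rw [if_neg (by simp)]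
      simp [sumAlt]
    | true =>
      rw [if_pos rfl]
      simp [sumAlt, netSeg, count_single]
      ring

-- ===== VERDICT (by name: the statement is the Claim_ definition above) =====
theorem count_braces_spec : Claim_equal_count_braces := by
  intro line _
  unfold Spec_count_braces count_braces count_braces_alt
  simp only []
  rw [splitOn_quote, foldEnum_eq_sumAlt, foldA_eq_scanB, scanB_eq_sumAlt]
  norm_num
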